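-- pv_equiv track=rewrite | github.com/iamprahladk/aoc-2016 | day07/code.py | get_hypernet_sequences
-- ===== SOURCE A (Python) =====
-- def get_hypernet_sequences(inp):
--     hypernets = []
--     normal_text = []
--     text = ''
--     for char in inp:
--         if char == '[':
--             normal_text.append(text)
--             text = ''
--         elif char == ']':
--             hypernets.append(text)
--             text = ''
--         else:
--             text += char
--     normal_text.append(text)
--     return normal_text, hypernets
-- ===== SOURCE B (Python) =====
-- def get_hypernet_sequences(inp):
--     # reverse traversal: classify each segment by the bracket to its right,
--     # building both result lists back-to-front
--     rev_normal, rev_hyper, buf, nxt = [], [], [], ''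
--     for char in reversed(inp):
--         if char == '[' or char == ']':
--             seg = ''.join(reversed(buf))
--             if nxt == ']':
--                 rev_hyper.append(seg)
--             else:
--                 rev_normal.append(seg)
--             nxt = char
--             buf = []
--         else:
--             buf.append(char)
--     seg = ''.join(reversed(buf))
--     if nxt == ']':
--         rev_hyper.append(seg)
--     else:
--         rev_normal.append(seg)
--     return rev_normal[::-1], rev_hyper[::-1]
-- ===== Notes on version B (the rewrite author's own statement) =====
-- stated objective: alternative
-- what changed: B scans the string in reverse, buffers each segment's characters and classifies the segment by the bracket to its right (remembered in nxt), appending to both result lists back-to-front and reversing them at the end, instead of A's forward state machine that grows a string accumulator and classifies on the spot.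
import Mathlib
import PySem

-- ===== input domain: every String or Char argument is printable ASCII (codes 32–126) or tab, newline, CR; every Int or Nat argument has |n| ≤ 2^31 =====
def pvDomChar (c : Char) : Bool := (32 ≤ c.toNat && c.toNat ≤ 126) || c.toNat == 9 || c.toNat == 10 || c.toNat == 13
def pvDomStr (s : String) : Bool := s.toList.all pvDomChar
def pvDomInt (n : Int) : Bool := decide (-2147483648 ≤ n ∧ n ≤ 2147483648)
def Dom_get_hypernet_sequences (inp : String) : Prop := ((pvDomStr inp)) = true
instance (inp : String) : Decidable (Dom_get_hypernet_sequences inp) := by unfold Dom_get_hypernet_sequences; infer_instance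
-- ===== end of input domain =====

-- B replaces A's forward accumulator state machine by a reverse traversal that
-- classifies each segment by the bracket to its right and builds both lists
-- back-to-front (alternative decomposition, same cost).


-- ===== PORT A =====
-- state: (normal_text, hypernets, text); 'text += char' is 'text ++ [c]' on the char list
def pvStepA (st : List String × List String × List Char) (c : Char) :
    List String × List String × List Char :=
  match st with
  | (normal, hyper, text) =>
    if c = '[' then (normal ++ [String.ofList text], hyper, [])
    else if c = ']' then (normal, hyper ++ [String.ofList text], [])
    else (normal, hyper, text ++ [c])

def get_hypernet_sequences (inp : String) : List String × List String :=
  match inp.toList.foldl pvStepA ([], [], []) with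
  | (normal, hyper, text) => (normal ++ [String.ofList text], hyper)

-- ===== PORT B =====
-- state: (rev_normal, rev_hyper, buf, nxt); buf collects the segment's chars in
-- reverse, nxt is the last bracket seen ([] = none yet)
def pvStepB (st : List String × List String × List Char × List Char) (c : Char) :
    List String × List String × List Char × List Char :=
  match st with
  | (rn, rh, buf, nxt) =>
    if c = '[' ∨ c = ']' then
      let seg := String.ofList buf.reverse
      if nxt = [']'] then (rn, rh ++ [seg], [], [c])
      else (rn ++ [seg], rh, [], [c])
    else (rn, rh, buf ++ [c], nxt)

def get_hypernet_sequences_alt (inp : String) : List String × List String :=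
  match inp.toList.reverse.foldl pvStepB ([], [], [], []) with
  | (rn, rh, buf, nxt) =>
    let seg := String.ofList buf.reverse
    if nxt = [']'] then (rn.reverse, (rh ++ [seg]).reverse)
    else ((rn ++ [seg]).reverse, rh.reverse)

-- ===== PRECONDITION & SPEC =====
def Spec_get_hypernet_sequences (inp : String) (out : List String × List String) : Prop := out = get_hypernet_sequences_alt inp
instance (inp : String) (out : List String × List String) : Decidable (Spec_get_hypernet_sequences inp out) := by unfold Spec_get_hypernet_sequences; infer_instance

-- ===== CLAIM (what is proved, stated in full; the proofs are below) =====
def Claim_equal_get_hypernet_sequences : Prop := ∀ (inp : String), Dom_get_hypernet_sequences inp → Spec_get_hypernet_sequences inp (get_hypernet_sequences inp)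

-- ===== LEMMAS AND PROOFS =====

-- reference function: both ports are proved equal to this structural recursion
def pvSpec (text : List Char) : List Char → List String × List String
  | [] => ([String.ofList text], [])
  | c :: cs =>
    if c = '[' then
      let p := pvSpec [] cs; (String.ofList text :: p.1, p.2)
    else if c = ']' then
      let p := pvSpec [] cs; (p.1, String.ofList text :: p.2)
    else pvSpec (text ++ [c]) cs

lemma pvA_loop (cs : List Char) : ∀ (n h : List String) (t : List Char),
    (match cs.foldl pvStepA (n, h, t) with
     | (normal, hyper, text) => (normal ++ [String.ofList text], hyper))
      = (n ++ (pvSpec t cs).1, h ++ (pvSpec t cs).2) := by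
  induction cs with
  | nil => intro n h t; simp [pvSpec]
  | cons c cs ih =>
    intro n h t
    by_cases h1 : c = '['
    · simp [pvStepA, pvSpec, h1, ih]
    · by_cases h2 : c = ']'
      · simp [pvStepA, pvSpec, h2, ih]
      · simp [pvStepA, pvSpec, h1, h2, ih]

-- B's invariant: state after folding the reversed list
def pvBinv : List Char → List String × List String × List Char × List Char
  | [] => ([], [], [], [])
  | c :: cs =>
    if c = '[' ∨ c = ']' then
      ((pvSpec [] cs).1.reverse, (pvSpec [] cs).2.reverse, [], [c])
    else
      match pvBinv cs with
      | (rn, rh, buf, nxt) => (rn, rh, buf ++ [c], nxt)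

-- flushing the pending buffer (prefixed by 'pre') yields the reversed pvSpec pair
lemma pvB_flush (cs : List Char) : ∀ (pre : List Char),
    (match pvBinv cs with
     | (rn, rh, buf, nxt) =>
       if nxt = [']'] then (rn, rh ++ [String.ofList (pre ++ buf.reverse)])
       else (rn ++ [String.ofList (pre ++ buf.reverse)], rh))
      = ((pvSpec pre cs).1.reverse, (pvSpec pre cs).2.reverse) := by
  induction cs with
  | nil => intro pre; simp [pvBinv, pvSpec]
  | cons c cs ih =>
    intro pre
    by_cases h1 : c = '['
    · simp [pvBinv, pvSpec, h1]
    · by_cases h2 : c = ']'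
      · simp [pvBinv, pvSpec, h2]
      · have hb : ¬ (c = '[' ∨ c = ']') := by simp [h1, h2]
        have := ih (pre ++ [c])
        simp [pvBinv, pvSpec, h1, h2] at this ⊢
        rcases hB : pvBinv cs with ⟨rn, rh, buf, nxt⟩
        rw [hB] at this
        simpa using this

-- the foldr form of B's loop computes pvBinv
lemma pvB_loop (cs : List Char) :
    cs.foldr (fun c st => pvStepB st c) ([], [], [], []) = pvBinv cs := by
  induction cs with
  | nil => rfl
  | cons c cs ih =>
    rw [List.foldr_cons, ih]
    by_cases hb : c = '[' ∨ c = ']'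
    · have hf := pvB_flush cs []
      rcases hB : pvBinv cs with ⟨rn, rh, buf, nxt⟩
      rw [hB] at hf
      dsimp only at hf
      simp only [pvBinv, hb, if_pos hb]
      by_cases hn : nxt = [']']
      · rw [if_pos hn] at hf
        simp only [List.nil_append, Prod.mk.injEq] at hf
        simp [pvStepB, hb, hn, hf.1, hf.2]
      · rw [if_neg hn] at hf
        simp only [List.nil_append, Prod.mk.injEq] at hf
        simp [pvStepB, hb, hn, hf.1, hf.2]
    · rcases hB : pvBinv cs with ⟨rn, rh, buf, nxt⟩
      simp [pvBinv, hb, hB, pvStepB]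

lemma pvB_eq (inp : String) :
    get_hypernet_sequences_alt inp = pvSpec [] inp.toList := by
  unfold get_hypernet_sequences_alt
  rw [List.foldl_reverse, pvB_loop]
  have hf := pvB_flush inp.toList []
  rcases hB : pvBinv inp.toList with ⟨rn, rh, buf, nxt⟩
  rw [hB] at hf
  dsimp only at hf ⊢
  by_cases hn : nxt = [']']
  · rw [if_pos hn] at hf
    rw [if_pos hn]
    simp only [List.nil_append, Prod.mk.injEq] at hf
    simp [hf.1, hf.2]
  · rw [if_neg hn] at hf
    rw [if_neg hn]
    simp only [List.nil_append, Prod.mk.injEq] at hf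
    simp [hf.1, hf.2]

lemma pvA_eq (inp : String) :
    get_hypernet_sequences inp = pvSpec [] inp.toList := by
  unfold get_hypernet_sequences
  rw [pvA_loop inp.toList [] [] []]
  simp

-- ===== VERDICT (by name: the statement is the Claim_ definition above) =====
theorem get_hypernet_sequences_spec : Claim_equal_get_hypernet_sequences := by
  intro inp _
  unfold Spec_get_hypernet_sequences
  rw [pvA_eq, pvB_eq]
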